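-- pv_equiv track=rewrite | github.com/pozilei6/extensions-final | colors.py | parse_H
-- ===== SOURCE A (Python) =====
-- def parse_H(row):
--     black_H = [1, 1, 1, 1, 1]
--     green_H = [1, 1, 1, 1, 1]
--     red_H = [1, 1, 1, 1]
--     for index, value in enumerate(row):
--         if value != "":
--             if index % 3 == 0:
--                 black_H[index // 3] = 0
--             elif index % 3 == 1:
--                 green_H[index // 3] = 0
--             elif index % 3 == 2:
--                 red_H[index // 3] = 0
--     return [black_H, green_H, red_H]
-- ===== SOURCE B (Python) =====
-- def parse_H(row):
--     row = list(row)
--     n = len(row)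
--
--     def bucket(off, size):
--         return [0 if off + 3 * j < n and row[off + 3 * j] != "" else 1
--                 for j in range(size)]
--
--     return [bucket(0, 5), bucket(1, 5), bucket(2, 4)]
-- ===== Notes on version B (the rewrite author's own statement) =====
-- stated objective: simpler
-- what changed: Replaces the single mod-3 dispatch loop that mutates three preallocated lists with a direct per-bucket construction: each of the three lists is built in one comprehension that reads position off+3*j, so no mutation, no enumerate and no branch dispatch remain; out-of-range flag positions are ignored instead of raising.
import Mathlib
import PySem

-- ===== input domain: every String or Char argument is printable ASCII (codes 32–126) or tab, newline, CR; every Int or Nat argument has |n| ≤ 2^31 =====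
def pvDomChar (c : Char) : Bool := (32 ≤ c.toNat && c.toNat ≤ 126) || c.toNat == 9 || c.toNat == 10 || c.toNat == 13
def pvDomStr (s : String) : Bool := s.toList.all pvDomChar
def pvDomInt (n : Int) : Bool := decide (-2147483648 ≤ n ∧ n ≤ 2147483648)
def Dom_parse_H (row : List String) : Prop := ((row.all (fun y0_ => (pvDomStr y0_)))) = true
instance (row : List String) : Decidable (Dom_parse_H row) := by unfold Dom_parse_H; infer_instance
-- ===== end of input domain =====

-- B builds each color bucket directly, one comprehension per bucket reading positions off+3*j,
-- instead of A's single enumerate loop dispatching on index % 3 and mutating preallocated lists.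

-- ===== PORT A =====
-- the loop body of A: one enumerate step (index, value) applied to the state (black_H, green_H, red_H)
def pvStepA (st : List Int × List Int × List Int) (p : Int × String) :
    List Int × List Int × List Int :=
  if p.2 ≠ "" then
    if PySem.Int.mod p.1 3 = 0 then
      (PySem.List.pySetD st.1 (PySem.Int.floordiv p.1 3) 0, st.2.1, st.2.2)
    else if PySem.Int.mod p.1 3 = 1 then
      (st.1, PySem.List.pySetD st.2.1 (PySem.Int.floordiv p.1 3) 0, st.2.2)
    else if PySem.Int.mod p.1 3 = 2 then
      (st.1, st.2.1, PySem.List.pySetD st.2.2 (PySem.Int.floordiv p.1 3) 0)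
    else st
  else st

def parse_H (row : List String) : List (List Int) :=
  let s := (PySem.List.enumerate row).foldl pvStepA
      ([1, 1, 1, 1, 1], [1, 1, 1, 1, 1], [1, 1, 1, 1])
  [s.1, s.2.1, s.2.2]

-- ===== PORT B =====
def pvBucket (row : List String) (off size : Nat) : List Int :=
  (List.range size).map (fun j =>
    if off + 3 * j < row.length ∧ row.getD (off + 3 * j) "" ≠ "" then 0 else 1)

def parse_H_alt (row : List String) : List (List Int) :=
  [pvBucket row 0 5, pvBucket row 1 5, pvBucket row 2 4]

-- ===== PRECONDITION & SPEC =====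
-- Pre_ excludes exactly the inputs on which Python A raises IndexError: a non-empty entry at an
-- index ≥ 14 addresses a bucket position outside the fixed-size lists (5/5/4).
def Pre_parse_H (row : List String) : Prop := ∀ s ∈ row.drop 14, s = ""
instance (row : List String) : Decidable (Pre_parse_H row) := by unfold Pre_parse_H; infer_instance
def pvWitness_parse_H : List String := ["1", "", "x"]

def Spec_parse_H (row : List String) (out : List (List Int)) : Prop := out = parse_H_alt row
instance (row : List String) (out : List (List Int)) : Decidable (Spec_parse_H row out) := by
  unfold Spec_parse_H; infer_instance

-- ===== CLAIM (what is proved, stated in full; the proofs are below) =====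
def Claim_equal_parse_H : Prop :=
  ∀ (row : List String), Dom_parse_H row → Pre_parse_H row → Spec_parse_H row (parse_H row)
-- ===== LEMMAS AND PROOFS =====
def pvHit (row : List String) (s m p : Nat) : Bool :=
  (List.range row.length).any
    (fun k => row.getD k "" != "" && (s + k) % 3 == m && (s + k) / 3 == p)

theorem pvHit_true_iff (row : List String) (s m p : Nat) :
    pvHit row s m p = true ↔
      ∃ k, k < row.length ∧ row.getD k "" ≠ "" ∧ (s + k) % 3 = m ∧ (s + k) / 3 = p := by
  simp [pvHit, List.any_eq_true, List.mem_range, and_assoc]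

theorem pvHit_cons (x : String) (row : List String) (s m p : Nat) :
    pvHit (x :: row) s m p =
      ((decide (x ≠ "") && (s % 3 == m) && (s / 3 == p)) || pvHit row (s + 1) m p) := by
  rw [Bool.eq_iff_iff]
  simp only [pvHit_true_iff, Bool.or_eq_true, Bool.and_eq_true, decide_eq_true_eq, beq_iff_eq]
  constructor
  · rintro ⟨k, hk, hne, h3, hd⟩
    cases k with
    | zero => exact Or.inl ⟨⟨by simpa using hne, by simpa using h3⟩, by simpa using hd⟩
    | succ k =>
      refine Or.inr ⟨k, by simpa using hk, by simpa using hne, ?_, ?_⟩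
      · rw [show s + 1 + k = s + (k + 1) by omega]; exact h3
      · rw [show s + 1 + k = s + (k + 1) by omega]; exact hd
  · rintro (⟨⟨hne, h3⟩, hd⟩ | ⟨k, hk, hne, h3, hd⟩)
    · exact ⟨0, by simp, by simpa using hne, by simpa using h3, by simpa using hd⟩
    · exact ⟨k + 1, by simp; omega, by simpa using hne,
        by rw [show s + (k + 1) = s + 1 + k by omega]; exact h3,
        by rw [show s + (k + 1) = s + 1 + k by omega]; exact hd⟩

theorem pvStepA_natCast (st : List Int × List Int × List Int) (s : Nat) (x : String) :
    pvStepA st ((s : Int), x) =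
      if x ≠ "" then
        if s % 3 = 0 then (PySem.List.pySetD st.1 ((s / 3 : Nat) : Int) 0, st.2.1, st.2.2)
        else if s % 3 = 1 then (st.1, PySem.List.pySetD st.2.1 ((s / 3 : Nat) : Int) 0, st.2.2)
        else (st.1, st.2.1, PySem.List.pySetD st.2.2 ((s / 3 : Nat) : Int) 0)
      else st := by
  unfold pvStepA
  have hm : PySem.Int.mod (s : Int) 3 = ((s % 3 : Nat) : Int) := by
    exact_mod_cast PySem.Int.mod_natCast s 3
  have hd : PySem.Int.floordiv (s : Int) 3 = ((s / 3 : Nat) : Int) := by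
    exact_mod_cast PySem.Int.floordiv_natCast s 3
  simp only [hm, hd]
  by_cases hx : x = ""
  · simp [hx]
  · have h3 : s % 3 = 0 ∨ s % 3 = 1 ∨ s % 3 = 2 := by omega
    rcases h3 with h | h | h <;> simp [hx, h]

theorem pvSetD_getElem? (xs : List Int) (n : Nat) (v : Int) (p : Nat) :
    (PySem.List.pySetD xs (n : Int) v)[p]? =
      if p = n ∧ p < xs.length then some v else xs[p]? := by
  by_cases h : n < xs.length
  · have hset : PySem.List.pySetD xs (n : Int) v = xs.set n v := by
      simp [PySem.List.pySetD, PySem.List.pySet?, PySem.List.pyIdx?, h]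
    rw [hset, List.getElem?_set]
    by_cases hp : p = n
    · subst hp; simp [h]
    · have hnp : n ≠ p := fun hh => hp hh.symm
      simp [hp, hnp]
  · have hset : PySem.List.pySetD xs (n : Int) v = xs := by
      simp only [PySem.List.pySetD, PySem.List.pySet?, PySem.List.pyIdx?]
      split_ifs with h1 h2 <;> simp <;> omega
    rw [hset]
    have hnp : ¬ (p = n ∧ p < xs.length) := by omega
    simp [hnp]
theorem pvSetD_getElem?_divCast (xs : List Int) (s : Nat) (v : Int) (p : Nat) :
    (PySem.List.pySetD xs ((s : Int) / 3) v)[p]? =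
      if p = s / 3 ∧ p < xs.length then some v else xs[p]? := by
  have hc : ((s : Int) / 3) = ((s / 3 : Nat) : Int) := by omega
  rw [hc, pvSetD_getElem?]

theorem pvSetD_getElem_ne (xs : List Int) (s : Nat) (v : Int) (p : Nat)
    (hne : ¬ p = s / 3) (h : p < (PySem.List.pySetD xs ((s : Int) / 3) v).length) :
    (PySem.List.pySetD xs ((s : Int) / 3) v)[p] =
      xs[p]'(by simpa [PySem.List.length_pySetD] using h) := by
  have h' : p < xs.length := by simpa [PySem.List.length_pySetD] using h
  have hq := pvSetD_getElem?_divCast xs s v p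
  rw [List.getElem?_eq_getElem h, List.getElem?_eq_getElem h'] at hq
  simp only [hne, false_and, if_false] at hq
  exact Option.some.inj hq

theorem pvFold1 (row : List String) (s : Nat) (st : List Int × List Int × List Int) (p : Nat) :
    ((PySem.List.enumerate row (s : Int)).foldl pvStepA st).1[p]? =
      if pvHit row s 0 p ∧ p < st.1.length then some 0 else st.1[p]? := by
  induction row generalizing s st with
  | nil => simp [PySem.List.enumerate_nil, pvHit]
  | cons x row ih =>
    rw [PySem.List.enumerate_cons, List.foldl_cons,
      show (s : Int) + 1 = ((s + 1 : Nat) : Int) by push_cast; ring,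
      ih (s + 1) (pvStepA st ((s : Int), x)), pvStepA_natCast]
    by_cases hx : x = ""
    · simp only [hx, ne_eq, not_true_eq_false, if_false]
      rw [pvHit_cons]
      simp [hx]
    · have hm3 : s % 3 = 0 ∨ s % 3 = 1 ∨ s % 3 = 2 := by omega
      rw [pvHit_cons]
      rcases hm3 with h | h | h <;>
        simp only [hx, ne_eq, not_false_eq_true, if_true, h, if_false, reduceIte,
          PySem.List.length_pySetD, pvSetD_getElem?, pvSetD_getElem?_divCast] <;>
        by_cases hh : pvHit row (s + 1) 0 p <;>
          by_cases hp : p = s / 3 <;> by_cases hl : p < st.1.length <;>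
          simp [hh, hp, hl, hx, h, pvSetD_getElem?, pvSetD_getElem?_divCast, pvSetD_getElem_ne, PySem.List.length_pySetD] <;> (intros; omega)

theorem pvFold2 (row : List String) (s : Nat) (st : List Int × List Int × List Int) (p : Nat) :
    ((PySem.List.enumerate row (s : Int)).foldl pvStepA st).2.1[p]? =
      if pvHit row s 1 p ∧ p < st.2.1.length then some 0 else st.2.1[p]? := by
  induction row generalizing s st with
  | nil => simp [PySem.List.enumerate_nil, pvHit]
  | cons x row ih =>
    rw [PySem.List.enumerate_cons, List.foldl_cons,
      show (s : Int) + 1 = ((s + 1 : Nat) : Int) by push_cast; ring,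
      ih (s + 1) (pvStepA st ((s : Int), x)), pvStepA_natCast]
    by_cases hx : x = ""
    · simp only [hx, ne_eq, not_true_eq_false, if_false]
      rw [pvHit_cons]
      simp
    · have hm3 : s % 3 = 0 ∨ s % 3 = 1 ∨ s % 3 = 2 := by omega
      rw [pvHit_cons]
      rcases hm3 with h | h | h <;>
        simp only [hx, ne_eq, not_false_eq_true, if_true, h, if_false, reduceIte,
          PySem.List.length_pySetD, pvSetD_getElem?, pvSetD_getElem?_divCast] <;>
        by_cases hh : pvHit row (s + 1) 1 p <;>
          by_cases hp : p = s / 3 <;> by_cases hl : p < st.2.1.length <;>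
          simp [hh, hp, hl, hx, h, pvSetD_getElem?, pvSetD_getElem?_divCast, pvSetD_getElem_ne, PySem.List.length_pySetD] <;>
          first
            | (intros; omega)
            | (split_ifs <;> simp_all <;> omega)

theorem pvFold3 (row : List String) (s : Nat) (st : List Int × List Int × List Int) (p : Nat) :
    ((PySem.List.enumerate row (s : Int)).foldl pvStepA st).2.2[p]? =
      if pvHit row s 2 p ∧ p < st.2.2.length then some 0 else st.2.2[p]? := by
  induction row generalizing s st with
  | nil => simp [PySem.List.enumerate_nil, pvHit]
  | cons x row ih =>
    rw [PySem.List.enumerate_cons, List.foldl_cons,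
      show (s : Int) + 1 = ((s + 1 : Nat) : Int) by push_cast; ring,
      ih (s + 1) (pvStepA st ((s : Int), x)), pvStepA_natCast]
    by_cases hx : x = ""
    · simp only [hx, ne_eq, not_true_eq_false, if_false]
      rw [pvHit_cons]
      simp
    · have hm3 : s % 3 = 0 ∨ s % 3 = 1 ∨ s % 3 = 2 := by omega
      rw [pvHit_cons]
      rcases hm3 with h | h | h <;>
        simp only [hx, ne_eq, not_false_eq_true, if_true, h, if_false, reduceIte,
          PySem.List.length_pySetD, pvSetD_getElem?, pvSetD_getElem?_divCast] <;>
        by_cases hh : pvHit row (s + 1) 2 p <;>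
          by_cases hp : p = s / 3 <;> by_cases hl : p < st.2.2.length <;>
          simp [hh, hp, hl, hx, h, pvSetD_getElem?, pvSetD_getElem?_divCast, pvSetD_getElem_ne, PySem.List.length_pySetD] <;>
          first
            | (intros; omega)
            | (split_ifs <;> simp_all <;> omega)

theorem pvBucket_getElem? (row : List String) (off size p : Nat) :
    (pvBucket row off size)[p]? =
      if p < size then
        some (if off + 3 * p < row.length ∧ row.getD (off + 3 * p) "" ≠ "" then 0 else 1)
      else none := by
  unfold pvBucket
  by_cases hp : p < size
  · rw [List.getElem?_map, List.getElem?_range hp]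
    simp [hp]
  · rw [List.getElem?_eq_none (by simpa using Nat.le_of_not_lt hp)]
    simp [hp]

theorem pvHit_zero_iff (row : List String) (m p : Nat) (hm : m < 3) :
    (pvHit row 0 m p = true) ↔ m + 3 * p < row.length ∧ row.getD (m + 3 * p) "" ≠ "" := by
  rw [pvHit_true_iff]
  constructor
  · rintro ⟨k, hk, hne, h3, hd⟩
    have hk' : k = m + 3 * p := by omega
    subst hk'; exact ⟨hk, hne⟩
  · rintro ⟨hk, hne⟩
    exact ⟨m + 3 * p, hk, hne, by omega, by omega⟩

theorem pvMain (row : List String) : parse_H row = parse_H_alt row := by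
  simp only [parse_H, parse_H_alt]
  rw [show (0 : Int) = ((0 : Nat) : Int) by norm_num]
  refine congrArg₂ _ ?_ (congrArg₂ _ ?_ (congrArg₂ _ ?_ rfl))
  · apply List.ext_getElem? (fun p => ?_)
    rw [pvFold1 row 0 ([1,1,1,1,1], [1,1,1,1,1], [1,1,1,1]) p, pvBucket_getElem?]
    by_cases hp : p < 5
    · have hinit : ([1,1,1,1,1] : List Int)[p]? = some 1 := by
        interval_cases p <;> rfl
      by_cases hh : pvHit row 0 0 p
      · obtain ⟨hb, hv⟩ := (pvHit_zero_iff row 0 p (by omega)).mp hh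
        simp only [Nat.zero_add] at hb hv
        have hv' : ¬ row[3 * p] = "" := by
          rw [List.getD_eq_getElem?_getD, List.getElem?_eq_getElem hb] at hv
          simpa using hv
        simp [hh, hp, hb, hv', hinit]
      · have hno : ¬ (0 + 3 * p < row.length ∧ row.getD (0 + 3 * p) "" ≠ "") := by
          intro hc
          exact hh ((pvHit_zero_iff row 0 p (by omega)).mpr (by simpa using hc))
        have hcond : ¬ (3 * p < row.length ∧ row.getD (3 * p) "" ≠ "") := by
          simpa using hno
        simp only [hh, hp, hinit, if_true, if_false, Bool.false_eq_true, false_and, and_true,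
          Nat.zero_add]
        rw [if_neg hcond]
    · have h5 : ¬ p < ([1,1,1,1,1] : List Int).length := by simpa using hp
      rw [List.getElem?_eq_none (by simpa using Nat.le_of_not_lt h5)]
      simp [hp, h5]
  · apply List.ext_getElem? (fun p => ?_)
    rw [pvFold2 row 0 ([1,1,1,1,1], [1,1,1,1,1], [1,1,1,1]) p, pvBucket_getElem?]
    by_cases hp : p < 5
    · have hinit : ([1,1,1,1,1] : List Int)[p]? = some 1 := by
        interval_cases p <;> rfl
      by_cases hh : pvHit row 0 1 p
      · obtain ⟨hb, hv⟩ := (pvHit_zero_iff row 1 p (by omega)).mp hh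
        have hv' : ¬ row[1 + 3 * p] = "" := by
          rw [List.getD_eq_getElem?_getD, List.getElem?_eq_getElem hb] at hv
          simpa using hv
        simp [hh, hp, hb, hv', hinit]
      · have hno : ¬ (1 + 3 * p < row.length ∧ row.getD (1 + 3 * p) "" ≠ "") := by
          intro hc
          exact hh ((pvHit_zero_iff row 1 p (by omega)).mpr hc)
        have hcond : ¬ (1 + 3 * p < row.length ∧ row.getD (1 + 3 * p) "" ≠ "") := hno
        simp only [hh, hp, hinit, if_true, if_false, Bool.false_eq_true, false_and, and_true]
        rw [if_neg hcond]
    · have h5 : ¬ p < ([1,1,1,1,1] : List Int).length := by simpa using hp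
      rw [List.getElem?_eq_none (by simpa using Nat.le_of_not_lt h5)]
      simp [hp, h5]
  · apply List.ext_getElem? (fun p => ?_)
    rw [pvFold3 row 0 ([1,1,1,1,1], [1,1,1,1,1], [1,1,1,1]) p, pvBucket_getElem?]
    by_cases hp : p < 4
    · have hinit : ([1,1,1,1] : List Int)[p]? = some 1 := by
        interval_cases p <;> rfl
      by_cases hh : pvHit row 0 2 p
      · obtain ⟨hb, hv⟩ := (pvHit_zero_iff row 2 p (by omega)).mp hh
        have hv' : ¬ row[2 + 3 * p] = "" := by
          rw [List.getD_eq_getElem?_getD, List.getElem?_eq_getElem hb] at hv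
          simpa using hv
        simp [hh, hp, hb, hv', hinit]
      · have hno : ¬ (2 + 3 * p < row.length ∧ row.getD (2 + 3 * p) "" ≠ "") := by
          intro hc
          exact hh ((pvHit_zero_iff row 2 p (by omega)).mpr hc)
        have hcond : ¬ (2 + 3 * p < row.length ∧ row.getD (2 + 3 * p) "" ≠ "") := hno
        simp only [hh, hp, hinit, if_true, if_false, Bool.false_eq_true, false_and, and_true]
        rw [if_neg hcond]
    · have h4 : ¬ p < ([1,1,1,1] : List Int).length := by simpa using hp
      rw [List.getElem?_eq_none (by simpa using Nat.le_of_not_lt h4)]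
      simp [hp, h4]

-- ===== VERDICT (by name: the statement is the Claim_ definition above) =====
theorem parse_H_spec : Claim_equal_parse_H := by
  intro row _ _
  unfold Spec_parse_H
  exact pvMain row
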